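-- pv_equiv track=rewrite | github.com/winter-olaf/algorithm-study | Programmers/최준원/[2]땅따먹기.py | hopscotch
-- ===== SOURCE A (Python) =====
-- import copy
--
-- def hopscotch(board, size):
--     result = 0
--     # 땅따먹기 게임으로 얻을 수 있는 최대 점수는?
--     for i in range(1, size):
--         for j in range(4):
--             temp = copy.deepcopy(board[i-1])
--             temp[j] = 0
--             board[i][j] += max(temp)
--     result = max(board[-1])
--     return result
-- ===== SOURCE B (Python) =====
-- def hopscotch(board, size):
--     for i in range(1, size):
--         prev = board[i - 1]
--         best = max(prev)
--         bi = prev.index(best)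
--         second = max(prev[:bi] + prev[bi + 1:])
--         row = board[i]
--         for j in range(4):
--             gain = second if j == bi else best
--             if gain > 0:
--                 row[j] += gain
--     return max(board[-1])
-- ===== Notes on version B (the rewrite author's own statement) =====
-- stated objective: alternative
-- what changed: A deep-copies the previous row and rescans it for every one of the 4 columns; B scans the previous row once per row for its maximum, that maximum's first index and the best value excluding that index, then updates each column from those two precomputed values (adding only when positive).
import Mathlib
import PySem

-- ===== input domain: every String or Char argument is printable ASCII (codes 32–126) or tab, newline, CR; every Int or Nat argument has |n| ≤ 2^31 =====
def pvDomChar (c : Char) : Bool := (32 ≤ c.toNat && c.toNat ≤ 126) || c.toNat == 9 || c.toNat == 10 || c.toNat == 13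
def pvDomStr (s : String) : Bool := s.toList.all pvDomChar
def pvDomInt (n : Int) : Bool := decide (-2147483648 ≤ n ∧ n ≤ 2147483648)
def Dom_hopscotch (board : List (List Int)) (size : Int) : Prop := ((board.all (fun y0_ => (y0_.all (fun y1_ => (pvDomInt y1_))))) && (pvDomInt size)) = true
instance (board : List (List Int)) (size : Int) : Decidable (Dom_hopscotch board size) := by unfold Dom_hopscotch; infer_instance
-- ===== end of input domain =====

-- B replaces A's per-column deepcopy-and-rescan of the previous row (4 scans per row) by one
-- best/second-best computation per row; both versions mutate `board` identically in Python,
-- and the equivalence proved here is about the return value with both ports threading the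
-- board state functionally.

-- ===== PORT A =====
def hopscotch (board : List (List Int)) (size : Int) : Int :=
  let b := (PySem.List.pyRange 1 size 1).foldl (fun b i =>
    (PySem.List.pyRange 0 4 1).foldl (fun b j =>
      let temp := PySem.List.pyGetD b (i - 1) []       -- temp = copy.deepcopy(board[i-1])
      let temp := PySem.List.pySetD temp j 0           -- temp[j] = 0
      let m := (PySem.List.max? temp (fun x => x)).getD 0
      let row := PySem.List.pyGetD b i []
      PySem.List.pySetD b i (PySem.List.pySetD row j (PySem.List.pyGetD row j 0 + m))) b) board
  (PySem.List.max? (PySem.List.pyGetD b (-1) []) (fun x => x)).getD 0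

-- ===== PORT B =====
def hopscotch_alt (board : List (List Int)) (size : Int) : Int :=
  let b := (PySem.List.pyRange 1 size 1).foldl (fun b i =>
    let prev := PySem.List.pyGetD b (i - 1) []
    let best := (PySem.List.max? prev (fun x => x)).getD 0
    let bi : Int := ((PySem.List.index? prev best).getD 0 : Nat)
    let second := (PySem.List.max?
        (PySem.List.slice prev none (some bi) ++ PySem.List.slice prev (some (bi + 1)) none)
        (fun x => x)).getD 0
    let row := PySem.List.pyGetD b i []
    let row' := (PySem.List.pyRange 0 4 1).foldl (fun r j =>
      let gain := if j == bi then second else best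
      if gain > 0 then PySem.List.pySetD r j (PySem.List.pyGetD r j 0 + gain) else r) row
    PySem.List.pySetD b i row') board
  (PySem.List.max? (PySem.List.pyGetD b (-1) []) (fun x => x)).getD 0

-- ===== PRECONDITION & SPEC =====
-- Pre_ is exactly where the Python A returns: board nonempty with a nonempty last row
-- (max(board[-1])), and for a nonempty loop (size ≥ 2) size ≤ len(board) and every row
-- touched by the loop has ≥ 4 entries (otherwise IndexError).
def Pre_hopscotch (board : List (List Int)) (size : Int) : Prop :=
  board ≠ [] ∧ board.getLast?.getD [] ≠ [] ∧ (2 ≤ size → size ≤ (board.length : Int)) ∧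
  ∀ i ∈ List.range board.length, 1 ≤ i → (i : Int) < size →
    4 ≤ (board.getD i []).length ∧ 4 ≤ (board.getD (i - 1) []).length
instance (board : List (List Int)) (size : Int) : Decidable (Pre_hopscotch board size) := by
  unfold Pre_hopscotch; infer_instance

def pvWitness_hopscotch : List (List Int) × Int := ([[1, 2, 3, 5], [5, 6, 7, 8], [4, 3, 2, 1]], 3)

def Spec_hopscotch (board : List (List Int)) (size : Int) (out : Int) : Prop := out = hopscotch_alt board size
instance (board : List (List Int)) (size : Int) (out : Int) : Decidable (Spec_hopscotch board size out) := by unfold Spec_hopscotch; infer_instance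

-- ===== CLAIM (what is proved, stated in full; the proofs are below) =====
def Claim_equal_hopscotch : Prop := ∀ (board : List (List Int)) (size : Int), Dom_hopscotch board size → Pre_hopscotch board size → Spec_hopscotch board size (hopscotch board size)

-- ===== LEMMAS AND PROOFS =====

-- Two step functions agree along a fold as long as an invariant is maintained.
theorem pvFoldl_eq_of_inv {α σ : Type} (P : σ → Prop) (f g : σ → α → σ) (l : List α) (s : σ)
    (hP : P s) (hpres : ∀ s a, a ∈ l → P s → P (f s a))
    (heq : ∀ s a, a ∈ l → P s → f s a = g s a) : l.foldl f s = l.foldl g s := by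
  induction l generalizing s with
  | nil => rfl
  | cons a l ih =>
      simp only [List.foldl_cons]
      rw [← heq s a (by simp) hP]
      exact ih (f s a) (hpres s a (by simp) hP)
        (fun s' a' h => hpres s' a' (by simp [h]))
        (fun s' a' h => heq s' a' (by simp [h]))

-- A fold preserves an invariant preserved by each step.
theorem pvFoldl_pres {α σ : Type} (P : σ → Prop) (f : σ → α → σ) (l : List α) (s : σ)
    (hP : P s) (hpres : ∀ s a, a ∈ l → P s → P (f s a)) : P (l.foldl f s) := by
  induction l generalizing s with
  | nil => exact hP
  | cons a l ih =>
      exact ih (f s a) (hpres s a (by simp) hP) (fun s' a' h => hpres s' a' (by simp [h]))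

-- The value of Python max(xs) is characterised by membership plus upper bound.
theorem pvMax_eq (xs : List Int) (m : Int) (hm : m ∈ xs) (hub : ∀ y ∈ xs, y ≤ m) :
    PySem.List.max? xs (fun x => x) = some m := by
  cases h : PySem.List.max? xs (fun x => x) with
  | none =>
      rw [PySem.List.max?_eq_none_iff] at h
      subst h; simp at hm
  | some M =>
      have hM := PySem.List.max?_mem h
      have hub' := PySem.List.max?_isMax h
      have : M = m := le_antisymm (hub M hM) (hub' m hm)
      rw [this]

-- pyGetD with a nonnegative index is getD.
theorem pvGetD_nonneg {α : Type} (ys : List α) (k : Int) (d : α) (hk : 0 ≤ k) :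
    PySem.List.pyGetD ys k d = ys.getD k.toNat d := by
  simp [PySem.List.pyGetD, PySem.List.pyGet?_of_nonneg ys hk, List.getD_eq_getElem?_getD]

theorem pvGetD_pySetD_ne (b : List (List Int)) (i m : Int) (x : List Int)
    (h0i : 0 ≤ i) (h0m : 0 ≤ m) (hne : m.toNat ≠ i.toNat) :
    PySem.List.pyGetD (PySem.List.pySetD b i x) m [] = PySem.List.pyGetD b m [] := by
  rw [PySem.List.pySetD_of_nonneg b x h0i, pvGetD_nonneg _ _ _ h0m, pvGetD_nonneg _ _ _ h0m]
  simp [List.getD_eq_getElem?_getD, List.getElem?_set_ne (fun h => hne h.symm)]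

theorem pvGetD_pySetD_self (b : List (List Int)) (i : Int) (x : List Int)
    (h0 : 0 ≤ i) (hib : i.toNat < b.length) :
    PySem.List.pyGetD (PySem.List.pySetD b i x) i [] = x := by
  rw [PySem.List.pySetD_of_nonneg b x h0, pvGetD_nonneg _ _ _ h0]
  simp [List.getD_eq_getElem?_getD, hib]

-- Equal row-length profiles give equal lengths of every row read with a default.
theorem pvLenGetD_map (l : List (List Int)) (k : Nat) :
    (l.getD k []).length = (l.map List.length).getD k 0 := by
  induction l generalizing k with
  | nil => simp [List.getD]
  | cons a l ih =>
      cases k with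
      | zero => simp [List.getD]
      | succ k => simpa [List.getD] using ih k

theorem pvLen_getD (b c : List (List Int)) (h : b.map List.length = c.map List.length)
    (k : Nat) : (b.getD k []).length = (c.getD k []).length := by
  rw [pvLenGetD_map, pvLenGetD_map, h]

-- THE MATH CORE: max of (p with p[j] := 0) is max(0, best-of-others), where
-- best-of-others is the overall max unless j is its first position, else the
-- max with that position removed.
theorem pvMax_set_zero (p : List Int) (best : Int) (biN : Nat) (second : Int)
    (hbest : PySem.List.max? p (fun x => x) = some best)
    (hbi : PySem.List.index? p best = some biN)
    (hsecond : PySem.List.max? (p.eraseIdx biN) (fun x => x) = some second)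
    (jN : Nat) (hj : jN < p.length) :
    PySem.List.max? (p.set jN 0) (fun x => x)
      = some (max 0 (if jN = biN then second else best)) := by
  obtain ⟨hbiN, hpbi, -⟩ := PySem.List.getElem_of_index?_eq_some hbi
  have hbub := PySem.List.max?_isMax hbest
  have hsm := PySem.List.max?_mem hsecond
  have hsub := PySem.List.max?_isMax hsecond
  have hdec : p.set jN 0 = p.take jN ++ 0 :: p.drop (jN + 1) :=
    List.set_eq_take_cons_drop 0 hj
  have herase : p.eraseIdx jN = p.take jN ++ p.drop (jN + 1) :=
    List.eraseIdx_eq_take_drop_succ p jN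
  have hsplit : ∀ y ∈ p.set jN 0, y = 0 ∨ y ∈ p.eraseIdx jN := by
    intro y hy
    rw [hdec] at hy
    rcases List.mem_append.mp hy with h | h
    · exact Or.inr (by rw [herase]; exact List.mem_append.mpr (Or.inl h))
    · rcases List.mem_cons.mp h with h0 | h'
      · exact Or.inl h0
      · exact Or.inr (by rw [herase]; exact List.mem_append.mpr (Or.inr h'))
  apply pvMax_eq
  · -- membership of max 0 g
    by_cases hg : (if jN = biN then second else best) ≤ 0
    · rw [max_eq_left hg, hdec]; simp
    · rw [max_eq_right (by omega)]
      by_cases hjb : jN = biN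
      · rw [if_pos hjb]
        have : second ∈ p.take jN ++ p.drop (jN + 1) := by
          rw [← herase, hjb]; exact hsm
        rw [hdec]
        rcases List.mem_append.mp this with h | h
        · exact List.mem_append.mpr (Or.inl h)
        · exact List.mem_append.mpr (Or.inr (List.mem_cons_of_mem _ h))
      · rw [if_neg hjb]
        have hcell : (p.set jN 0)[biN]'(by simpa using hbiN) = p[biN] :=
          List.getElem_set_ne hjb _
        rw [← hpbi, ← hcell]
        exact List.getElem_mem _
  · -- upper bound
    intro y hy
    rcases hsplit y hy with h0 | hmem
    · subst h0; exact le_max_left _ _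
    · refine le_trans ?_ (le_max_right _ _)
      by_cases hjb : jN = biN
      · rw [if_pos hjb]; subst hjb; exact hsub y hmem
      · rw [if_neg hjb]; exact hbub y (List.mem_of_mem_eraseIdx hmem)

-- One column update: A's "zero the copy and rescan" equals B's "best/second + guard".
theorem pvRowStep (p : List Int) (best : Int) (biN : Nat) (second : Int)
    (hbest : PySem.List.max? p (fun x => x) = some best)
    (hbi : PySem.List.index? p best = some biN)
    (hsecond : PySem.List.max? (p.eraseIdx biN) (fun x => x) = some second)
    (hp4 : 4 ≤ p.length) (r : List Int) (hr : 4 ≤ r.length)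
    (j : Int) (hj0 : 0 ≤ j) (hj4 : j < 4) :
    PySem.List.pySetD r j (PySem.List.pyGetD r j 0 +
        (PySem.List.max? (PySem.List.pySetD p j 0) (fun x => x)).getD 0)
      = (if (if j == ((biN : Nat) : Int) then second else best) > 0
           then PySem.List.pySetD r j (PySem.List.pyGetD r j 0 +
                  (if j == ((biN : Nat) : Int) then second else best))
           else r) := by
  have hjlt : j.toNat < p.length := by omega
  have key := pvMax_set_zero p best biN second hbest hbi hsecond j.toNat hjlt
  have hr0 : PySem.List.pySetD r j (PySem.List.pyGetD r j 0 + 0) = r := by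
    rw [PySem.List.pySetD_of_nonneg r _ hj0, pvGetD_nonneg r j 0 hj0, add_zero]
    have hjr : j.toNat < r.length := by omega
    rw [List.getD_eq_getElem r 0 hjr]
    exact List.set_getElem_self hjr
  rw [PySem.List.pySetD_of_nonneg p 0 hj0, key, Option.getD_some]
  simp only [beq_iff_eq]
  by_cases hjb : j.toNat = biN
  · simp only [if_pos hjb, if_pos (show j = ((biN : Nat) : Int) by omega)]
    by_cases hs : second > 0
    · rw [if_pos hs, max_eq_right (by omega)]
    · rw [if_neg hs, max_eq_left (by omega)]
      exact hr0
  · simp only [if_neg hjb, if_neg (show ¬ j = ((biN : Nat) : Int) by omega)]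
    by_cases hb : best > 0
    · rw [if_pos hb, max_eq_right (by omega)]
    · rw [if_neg hb, max_eq_left (by omega)]
      exact hr0

-- Repeated assignment to the same board row collapses.
theorem pvSetD_SetD (b : List (List Int)) (i : Int) (x y : List Int) (h0 : 0 ≤ i) :
    PySem.List.pySetD (PySem.List.pySetD b i x) i y = PySem.List.pySetD b i y := by
  rw [PySem.List.pySetD_of_nonneg b x h0, PySem.List.pySetD_of_nonneg _ y h0,
      PySem.List.pySetD_of_nonneg b y h0]
  exact List.set_set _

-- Writing a row of unchanged length keeps the board's row-length profile.
theorem pvMap_len_pySetD (b : List (List Int)) (i : Int) (x : List Int)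
    (h0 : 0 ≤ i) (hib : i.toNat < b.length) (hx : x.length = (b.getD i.toNat []).length) :
    (PySem.List.pySetD b i x).map List.length = b.map List.length := by
  rw [PySem.List.pySetD_of_nonneg b x h0, List.map_set]
  have h1 : x.length = (b.map List.length)[i.toNat]'(by simpa using hib) := by
    rw [List.getElem_map, hx, List.getD_eq_getElem b [] hib]
  rw [h1]
  exact List.set_getElem_self (by simpa using hib)

-- A's inner column loop only rewrites row i, so it is one row-level loop with
-- the previous row read once.
theorem pvHoistA (i : Int) (hi : 1 ≤ i) (js : List Int)
    (b : List (List Int)) (hib : i.toNat < b.length) :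
    js.foldl (fun b j =>
      PySem.List.pySetD b i (PySem.List.pySetD (PySem.List.pyGetD b i []) j
        (PySem.List.pyGetD (PySem.List.pyGetD b i []) j 0 +
          (PySem.List.max? (PySem.List.pySetD (PySem.List.pyGetD b (i - 1) []) j 0)
            (fun x => x)).getD 0))) b
    = PySem.List.pySetD b i (js.foldl (fun r j =>
        PySem.List.pySetD r j (PySem.List.pyGetD r j 0 +
          (PySem.List.max? (PySem.List.pySetD (PySem.List.pyGetD b (i - 1) []) j 0)
            (fun x => x)).getD 0)) (PySem.List.pyGetD b i [])) := by
  induction js generalizing b with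
  | nil =>
      simp only [List.foldl_nil]
      rw [pvGetD_nonneg b i [] (by omega), PySem.List.pySetD_of_nonneg b _ (by omega),
          List.getD_eq_getElem b [] hib]
      exact (List.set_getElem_self hib).symm
  | cons j js ih =>
      simp only [List.foldl_cons]
      generalize PySem.List.pySetD (PySem.List.pyGetD b i []) j
        (PySem.List.pyGetD (PySem.List.pyGetD b i []) j 0 +
          (PySem.List.max? (PySem.List.pySetD (PySem.List.pyGetD b (i - 1) []) j 0)
            (fun x => x)).getD 0) = x
      rw [ih (PySem.List.pySetD b i x) (by rw [PySem.List.length_pySetD]; exact hib)]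
      simp only [pvGetD_pySetD_ne b i (i - 1) x (by omega) (by omega) (by omega),
        pvGetD_pySetD_self b i x (by omega) hib,
        pvSetD_SetD b i x _ (by omega)]

-- Proof-side names for the two step functions (definitionally the loop bodies
-- of the two ports).
def pvStepA (i : Int) (b : List (List Int)) : List (List Int) :=
  (PySem.List.pyRange 0 4 1).foldl (fun b j =>
    PySem.List.pySetD b i (PySem.List.pySetD (PySem.List.pyGetD b i []) j
      (PySem.List.pyGetD (PySem.List.pyGetD b i []) j 0 +
        (PySem.List.max? (PySem.List.pySetD (PySem.List.pyGetD b (i - 1) []) j 0)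
          (fun x => x)).getD 0))) b

def pvGainB (p : List Int) (j : Int) : Int :=
  let best := (PySem.List.max? p (fun x => x)).getD 0
  let bi : Int := ((PySem.List.index? p best).getD 0 : Nat)
  let second := (PySem.List.max?
      (PySem.List.slice p none (some bi) ++ PySem.List.slice p (some (bi + 1)) none)
      (fun x => x)).getD 0
  if j == bi then second else best

def pvStepB (i : Int) (b : List (List Int)) : List (List Int) :=
  PySem.List.pySetD b i ((PySem.List.pyRange 0 4 1).foldl (fun r j =>
    if pvGainB (PySem.List.pyGetD b (i - 1) []) j > 0
    then PySem.List.pySetD r j (PySem.List.pyGetD r j 0 +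
           pvGainB (PySem.List.pyGetD b (i - 1) []) j)
    else r) (PySem.List.pyGetD b i []))

-- One outer iteration: A's step equals B's step on boards with board's row profile.
theorem pvStep_eq (board : List (List Int)) (size : Int)
    (hlen : 2 ≤ size → size ≤ (board.length : Int))
    (hrows : ∀ k ∈ List.range board.length, 1 ≤ k → (k : Int) < size →
      4 ≤ (board.getD k []).length ∧ 4 ≤ (board.getD (k - 1) []).length)
    (b : List (List Int)) (i : Int) (hmem : i ∈ PySem.List.pyRange 1 size 1)
    (hinv : b.map List.length = board.map List.length) :
    pvStepA i b = pvStepB i b := by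
  rw [PySem.List.mem_pyRange_one] at hmem
  obtain ⟨hi1, his⟩ := hmem
  have hsz : size ≤ (board.length : Int) := hlen (by omega)
  have hlb : b.length = board.length := by
    have := congrArg List.length hinv; simpa using this
  have hib : i.toNat < b.length := by omega
  have hk := hrows i.toNat (List.mem_range.mpr (by omega)) (by omega) (by omega)
  have hp4 : 4 ≤ (PySem.List.pyGetD b (i - 1) []).length := by
    rw [pvGetD_nonneg b (i - 1) [] (by omega),
        (show (i - 1).toNat = i.toNat - 1 by omega), pvLen_getD b board hinv]
    exact hk.2
  have hr4 : 4 ≤ (PySem.List.pyGetD b i []).length := by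
    rw [pvGetD_nonneg b i [] (by omega), pvLen_getD b board hinv]
    exact hk.1
  have hpne : PySem.List.pyGetD b (i - 1) [] ≠ [] := by
    intro h; rw [h] at hp4; simp at hp4
  obtain ⟨best, hbest⟩ : ∃ m, PySem.List.max? (PySem.List.pyGetD b (i - 1) []) (fun x => x) = some m := by
    cases h : PySem.List.max? (PySem.List.pyGetD b (i - 1) []) (fun x => x) with
    | none => exact absurd ((PySem.List.max?_eq_none_iff _ _).mp h) hpne
    | some m => exact ⟨m, rfl⟩
  obtain ⟨biN, hbi⟩ : ∃ n, PySem.List.index? (PySem.List.pyGetD b (i - 1) []) best = some n := by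
    have hmem' : best ∈ PySem.List.pyGetD b (i - 1) [] := PySem.List.max?_mem hbest
    exact Option.isSome_iff_exists.mp ((PySem.List.index?_isSome_iff _ _).mpr hmem')
  obtain ⟨hbiNlt, -, -⟩ := PySem.List.getElem_of_index?_eq_some hbi
  have herane : (PySem.List.pyGetD b (i - 1) []).eraseIdx biN ≠ [] := by
    rw [List.eraseIdx_eq_take_drop_succ]
    intro h
    have h1 := congrArg List.length h
    rw [List.length_append, List.length_take, List.length_drop] at h1
    simp only [List.length_nil] at h1
    omega
  obtain ⟨second, hsecond⟩ : ∃ m,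
      PySem.List.max? ((PySem.List.pyGetD b (i - 1) []).eraseIdx biN) (fun x => x) = some m := by
    cases h : PySem.List.max? ((PySem.List.pyGetD b (i - 1) []).eraseIdx biN) (fun x => x) with
    | none => exact absurd ((PySem.List.max?_eq_none_iff _ _).mp h) herane
    | some m => exact ⟨m, rfl⟩
  have hslice : PySem.List.slice (PySem.List.pyGetD b (i - 1) []) none (some ((biN : Nat) : Int)) ++
      PySem.List.slice (PySem.List.pyGetD b (i - 1) []) (some (((biN : Nat) : Int) + 1)) none
      = (PySem.List.pyGetD b (i - 1) []).eraseIdx biN := by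
    rw [(show (((biN : Nat) : Int) + 1) = (((biN + 1 : Nat)) : Int) by push_cast; ring),
        PySem.List.slice_to_natCast, PySem.List.slice_from_natCast,
        List.eraseIdx_eq_take_drop_succ]
  have hgain : ∀ j : Int, pvGainB (PySem.List.pyGetD b (i - 1) []) j
      = if j == ((biN : Nat) : Int) then second else best := by
    intro j
    unfold pvGainB
    simp only [hbest, Option.getD_some, hbi, hslice, hsecond]
  unfold pvStepA pvStepB
  rw [pvHoistA i hi1 _ b hib]
  apply congrArg (PySem.List.pySetD b i)
  apply pvFoldl_eq_of_inv (fun r : List Int => r.length = (PySem.List.pyGetD b i []).length)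
  · rfl
  · intro r j hj hP
    have hP' : r.length = (PySem.List.pyGetD b i []).length := hP
    show (PySem.List.pySetD r j _).length = (PySem.List.pyGetD b i []).length
    rw [PySem.List.length_pySetD]; exact hP'
  · intro r j hj hP
    have hP' : r.length = (PySem.List.pyGetD b i []).length := hP
    rw [PySem.List.mem_pyRange_one] at hj
    obtain ⟨hj0, hj4⟩ := hj
    rw [hgain j]
    exact pvRowStep _ best biN second hbest hbi hsecond hp4 r (by omega) j hj0 hj4

-- B's step keeps the row-length profile.
theorem pvStepB_pres (board : List (List Int)) (size : Int)
    (hlen : 2 ≤ size → size ≤ (board.length : Int))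
    (b : List (List Int)) (i : Int) (hmem : i ∈ PySem.List.pyRange 1 size 1)
    (hinv : b.map List.length = board.map List.length) :
    (pvStepB i b).map List.length = board.map List.length := by
  rw [PySem.List.mem_pyRange_one] at hmem
  obtain ⟨hi1, his⟩ := hmem
  have hsz : size ≤ (board.length : Int) := hlen (by omega)
  have hlb : b.length = board.length := by
    have := congrArg List.length hinv; simpa using this
  have hib : i.toNat < b.length := by omega
  have hrowlen : ((PySem.List.pyRange 0 4 1).foldl (fun r j =>
      if pvGainB (PySem.List.pyGetD b (i - 1) []) j > 0
      then PySem.List.pySetD r j (PySem.List.pyGetD r j 0 +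
             pvGainB (PySem.List.pyGetD b (i - 1) []) j)
      else r) (PySem.List.pyGetD b i [])).length
      = (PySem.List.pyGetD b i []).length := by
    refine pvFoldl_pres (fun r : List Int => r.length = (PySem.List.pyGetD b i []).length)
      (fun r j => if pvGainB (PySem.List.pyGetD b (i - 1) []) j > 0
        then PySem.List.pySetD r j (PySem.List.pyGetD r j 0 +
               pvGainB (PySem.List.pyGetD b (i - 1) []) j)
        else r) (PySem.List.pyRange 0 4 1) (PySem.List.pyGetD b i []) rfl ?_
    intro r j hj hP
    have hP' : r.length = (PySem.List.pyGetD b i []).length := hP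
    by_cases h : pvGainB (PySem.List.pyGetD b (i - 1) []) j > 0
    · simp only [if_pos h, PySem.List.length_pySetD]; exact hP'
    · simp only [if_neg h]; exact hP' 
  unfold pvStepB
  rw [pvMap_len_pySetD b i _ (by omega) hib
      (by rw [hrowlen, pvGetD_nonneg b i [] (by omega)]), hinv]

theorem hopscotch_spec : Claim_equal_hopscotch := by
  intro board size hdom hpre
  obtain ⟨-, -, hlen, hrows⟩ := hpre
  have H : (PySem.List.pyRange 1 size 1).foldl (fun b i => pvStepA i b) board
      = (PySem.List.pyRange 1 size 1).foldl (fun b i => pvStepB i b) board := by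
    apply pvFoldl_eq_of_inv (fun b => b.map List.length = board.map List.length)
    · rfl
    · intro s a ha hP
      rw [pvStep_eq board size hlen hrows s a ha hP]
      exact pvStepB_pres board size hlen s a ha hP
    · intro s a ha hP
      exact pvStep_eq board size hlen hrows s a ha hP
  show (PySem.List.max? (PySem.List.pyGetD
      ((PySem.List.pyRange 1 size 1).foldl (fun b i => pvStepA i b) board) (-1) [])
      (fun x => x)).getD 0
    = (PySem.List.max? (PySem.List.pyGetD
      ((PySem.List.pyRange 1 size 1).foldl (fun b i => pvStepB i b) board) (-1) [])
      (fun x => x)).getD 0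
  rw [H]
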